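-- pv_equiv track=rewrite | github.com/pzac/advent-of-code-2023-python | day-01/main.py | ordered_numbers_as_strings
-- ===== SOURCE A (Python) =====
-- NUMBERS = {
--   "one" : 1,
--   "two" : 2,
--   "three" : 3,
--   "four" : 4,
--   "five" : 5,
--   "six" : 6,
--   "seven" : 7,
--   "eight" : 8,
--   "nine" : 9
-- }
--
-- def ordered_numbers_as_strings(string, reverse=False):
--   out = []
--   for s, i in NUMBERS.items():
--     if reverse:
--       s = flip_string(s)
--     pos = string.find(s)
--     if pos != -1:
--       out.append((s, pos))
--   return sorted(out, key=lambda item: item[1])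
--
-- def flip_string(string):
--   return ''.join(reversed(string))
-- ===== SOURCE B (Python) =====
-- NUMBERS = {
--   "one" : 1,
--   "two" : 2,
--   "three" : 3,
--   "four" : 4,
--   "five" : 5,
--   "six" : 6,
--   "seven" : 7,
--   "eight" : 8,
--   "nine" : 9
-- }
--
-- def flip_string(string):
--   return ''.join(reversed(string))
--
-- def ordered_numbers_as_strings(string, reverse=False):
--   words = [flip_string(s) if reverse else s for s in NUMBERS]
--   found = set()
--   out = []
--   for i in range(len(string)):
--     for w in words:
--       if w not in found and string.startswith(w, i):
--         found.add(w)
--         out.append((w, i))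
--   return out
-- ===== Notes on version B (the rewrite author's own statement) =====
-- stated objective: alternative
-- what changed: Instead of calling str.find for every number word and then sorting the hits by position, B makes one left-to-right scan of the string (positions outer, not-yet-found words inner), recording each word the first time it starts at the current position, so the result is emitted already in position order and no sort is needed.
import Mathlib
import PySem

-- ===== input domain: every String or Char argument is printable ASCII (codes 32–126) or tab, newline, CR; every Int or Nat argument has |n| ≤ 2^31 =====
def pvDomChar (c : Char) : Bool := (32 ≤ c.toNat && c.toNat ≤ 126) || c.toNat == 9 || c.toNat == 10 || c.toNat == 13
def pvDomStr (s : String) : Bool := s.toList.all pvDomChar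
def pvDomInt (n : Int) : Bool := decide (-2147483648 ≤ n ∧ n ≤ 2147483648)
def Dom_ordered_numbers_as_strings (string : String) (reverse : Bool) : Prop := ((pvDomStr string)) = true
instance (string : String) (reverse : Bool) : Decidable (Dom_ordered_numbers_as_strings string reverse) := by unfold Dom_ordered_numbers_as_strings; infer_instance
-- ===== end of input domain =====

-- B replaces A's find-per-word-then-sort with a single left-to-right scan of the string
-- (positions outer, unfound words inner), so the output is emitted already in position order
-- and no sort is needed; same return value, no side effects (objective: alternative).

-- ===== PORT A =====
def pvNUMBERS : PySem.Dict String Int :=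
  PySem.Dict.ofList [("one", 1), ("two", 2), ("three", 3), ("four", 4), ("five", 5),
                     ("six", 6), ("seven", 7), ("eight", 8), ("nine", 9)]

-- ''.join(reversed(string)) : exact — reversed iterates the code points, join concatenates them
def flip_string (string : String) : String := String.ofList string.toList.reverse

def ordered_numbers_as_strings (string : String) (reverse : Bool) : List (String × Int) :=
  let out := pvNUMBERS.items.foldl (fun out si =>
    let s := if reverse then flip_string si.1 else si.1
    let pos := PySem.Str.find string s
    if pos ≠ -1 then out ++ [(s, pos)] else out) []
  PySem.List.sorted out (fun item => item.2)

-- ===== PORT B =====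
-- string.startswith(w, i) : hand port, exact for 0 <= i (Python reads the start as a slice
-- bound; B only calls it with 0 <= i < len(string))
def pvStartswithFrom (s w : String) (i : Int) : Bool :=
  PySem.Chars.startswith (s.toList.drop i.toNat) w.toList

def ordered_numbers_as_strings_alt (string : String) (reverse : Bool) : List (String × Int) :=
  let words := pvNUMBERS.keys.map (fun s => if reverse then flip_string s else s)
  let res := (PySem.List.pyRange 0 (PySem.Str.len string)).foldl
    (fun st i =>
      words.foldl (fun st w =>
        if !(PySem.Set.contains st.1 w) && pvStartswithFrom string w i
        then (PySem.Set.add st.1 w, st.2 ++ [(w, i)])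
        else st) st)
    ((PySem.Set.empty : PySem.Set String), ([] : List (String × Int)))
  res.2

-- ===== PRECONDITION & SPEC =====
def Spec_ordered_numbers_as_strings (string : String) (reverse : Bool) (out : List (String × Int)) : Prop := out = ordered_numbers_as_strings_alt string reverse
instance (string : String) (reverse : Bool) (out : List (String × Int)) : Decidable (Spec_ordered_numbers_as_strings string reverse out) := by unfold Spec_ordered_numbers_as_strings; infer_instance

-- ===== CLAIM (what is proved, stated in full; the proofs are below) =====
def Claim_equal_ordered_numbers_as_strings : Prop := ∀ (string : String) (reverse : Bool), Dom_ordered_numbers_as_strings string reverse → Spec_ordered_numbers_as_strings string reverse (ordered_numbers_as_strings string reverse)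

-- ===== LEMMAS AND PROOFS =====

-- the word list both ports effectively iterate over
def pvWords (reverse : Bool) : List String :=
  pvNUMBERS.keys.map (fun s => if reverse then flip_string s else s)

def pvF (string w : String) : Int := PySem.Str.find string w

-- words matched (for the first time) at position i, in word-list order
def pvBlock (string : String) (ws : List String) (i : Int) : List (String × Int) :=
  ws.filterMap (fun w => if pvF string w = i then some (w, i) else none)

-- B's output after scanning the first k positions
def pvCanon (string : String) (ws : List String) (k : Nat) : List (String × Int) :=
  (List.range k).flatMap (fun i : Nat => pvBlock string ws (i : Int))

-- A's unsorted list
def pvL (string : String) (ws : List String) : List (String × Int) :=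
  ws.filterMap (fun w => if pvF string w ≠ -1 then some (w, pvF string w) else none)

lemma pv_foldl_out {α β : Type} (cond : α → Prop) [DecidablePred cond] (p : α → β) :
    ∀ (l : List α) (acc : List β),
      l.foldl (fun out x => if cond x then out ++ [p x] else out) acc
        = acc ++ l.filterMap (fun x => if cond x then some (p x) else none) := by
  intro l
  induction l with
  | nil => simp
  | cons x t ih =>
    intro acc
    by_cases h : cond x <;> simp [h, ih]

-- A's fold equals pvL over pvWords
lemma pvA_eq (string : String) (reverse : Bool) :
    ordered_numbers_as_strings string reverse
      = PySem.List.sorted (pvL string (pvWords reverse)) (fun item => item.2) := by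
  show PySem.List.sorted
      (pvNUMBERS.items.foldl (fun out si =>
        if pvF string (if reverse then flip_string si.1 else si.1) ≠ -1 then
          out ++ [((if reverse then flip_string si.1 else si.1),
                    pvF string (if reverse then flip_string si.1 else si.1))]
        else out) [])
      (fun item => item.2) = _
  unfold pvL pvWords
  rw [pv_foldl_out (α := String × Int)
        (cond := fun si => pvF string (if reverse then flip_string si.1 else si.1) ≠ -1)
        (p := fun si => (if reverse then flip_string si.1 else si.1,
                          pvF string (if reverse then flip_string si.1 else si.1)))]
  rw [List.nil_append, List.filterMap_map]
  rfl

-- find facts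
lemma pv_f_lt (string w : String) (hw : w.toList ≠ []) (h0 : 0 ≤ pvF string w) :
    pvF string w < (string.toList.length : Int) := by
  have hs := PySem.Chars.find_spec (s := string.toList) (sub := w.toList)
      (by simpa [pvF, PySem.Str.find_eq] using h0)
  rcases hs.1 with ⟨t, ht⟩
  have hle := PySem.Chars.find_le_length string.toList w.toList
  have hne : string.toList.drop (PySem.Chars.find string.toList w.toList).toNat ≠ [] := by
    intro hnil
    rw [hnil] at ht
    exact hw (by cases w.toList <;> simp_all)
  have hlt : (PySem.Chars.find string.toList w.toList).toNat < string.toList.length := by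
    by_contra hge
    exact hne (List.drop_eq_nil_of_le (by omega))
  simp only [pvF, PySem.Str.find_eq] at *
  omega

lemma pv_f_ne_iff (string w : String) (hw : w.toList ≠ []) :
    pvF string w ≠ -1 ↔ (0 ≤ pvF string w ∧ pvF string w < (string.toList.length : Int)) := by
  have h := PySem.Chars.neg_one_le_find string.toList w.toList
  constructor
  · intro hne
    have h0 : 0 ≤ pvF string w := by simp only [pvF, PySem.Str.find_eq] at *; omega
    exact ⟨h0, pv_f_lt string w hw h0⟩
  · intro ⟨h0, _⟩; omega

-- the scan condition at position k is "first occurrence of w is exactly k"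
lemma pv_cond_iff (string w : String) (k : Nat) :
    (PySem.Chars.startswith (string.toList.drop k) w.toList = true
        ∧ ¬(0 ≤ pvF string w ∧ pvF string w < (k : Int)))
      ↔ pvF string w = (k : Int) := by
  simp only [pvF, PySem.Str.find_eq, PySem.Chars.startswith_iff]
  constructor
  · rintro ⟨hpre, hnot⟩
    have hin : ∃ j, w.toList <+: string.toList.drop j := ⟨k, hpre⟩
    have h0 : 0 ≤ PySem.Chars.find string.toList w.toList := by
      rw [PySem.Chars.find_nonneg_iff]
      have := (PySem.Chars.exists_prefix_drop_iff_isIn w.toList string.toList).1 hin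
      exact (PySem.Chars.isIn_iff_infix w.toList string.toList).1 this
    have hs := PySem.Chars.find_spec (s := string.toList) (sub := w.toList) h0
    have hle : (PySem.Chars.find string.toList w.toList).toNat ≤ k := by
      by_contra hgt
      exact hs.2 k (by omega) hpre
    omega
  · intro h
    have h0 : 0 ≤ PySem.Chars.find string.toList w.toList := by omega
    have hs := PySem.Chars.find_spec (s := string.toList) (sub := w.toList) h0
    refine ⟨?_, by omega⟩
    have : (PySem.Chars.find string.toList w.toList).toNat = k := by omega
    rw [← this]; exact hs.1

-- the Bool condition B tests, rewritten to chars level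
lemma pv_bool_cond (string w : String) (s : PySem.Set String) (k : Nat) :
    (!(PySem.Set.contains s w) && pvStartswithFrom string w (k : Int)) = true
      ↔ (w ∉ s ∧ PySem.Chars.startswith (string.toList.drop k) w.toList = true) := by
  rw [Bool.and_eq_true, Bool.not_eq_true', pvStartswithFrom, Int.toNat_natCast]
  have hcm : PySem.Set.contains s w = false ↔ w ∉ s := by
    constructor
    · intro h1 hm
      rw [(PySem.Set.contains_iff s w).2 hm] at h1
      cases h1
    · intro h1
      cases hc : PySem.Set.contains s w
      · rfl
      · exact absurd ((PySem.Set.contains_iff s w).1 hc) h1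
  rw [hcm]

-- inner loop: one position k, scanning the remaining words ws'
lemma pv_inner (string : String) (k : Nat) :
    ∀ (ws' : List String) (s : PySem.Set String) (out : List (String × Int)),
      ws'.Nodup →
      (∀ w ∈ ws', (w ∈ s ↔ (0 ≤ pvF string w ∧ pvF string w < (k : Int)))) →
      ∃ s2,
        ws'.foldl (fun st w =>
            if !(PySem.Set.contains st.1 w)
                && pvStartswithFrom string w (k : Int)
            then (PySem.Set.add st.1 w, st.2 ++ [(w, (k : Int))])
            else st) (s, out)
          = (s2, out ++ pvBlock string ws' (k : Int))
        ∧ ∀ x, x ∈ s2 ↔ (x ∈ s ∨ (x ∈ ws' ∧ pvF string x = (k : Int))) := by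
  intro ws'
  induction ws' with
  | nil =>
    intro s out _ _
    exact ⟨s, by simp [pvBlock], fun x => by simp⟩
  | cons w t ih =>
    intro s out hnd hmem
    have hndt : t.Nodup := (List.nodup_cons.1 hnd).2
    have hwt : w ∉ t := (List.nodup_cons.1 hnd).1
    by_cases hfw : pvF string w = (k : Int)
    · -- condition fires
      have hcond : (!(PySem.Set.contains s w)
          && pvStartswithFrom string w (k : Int)) = true := by
        rw [pv_bool_cond]
        have h2 := (pv_cond_iff string w k).2 hfw
        refine ⟨fun hm => ?_, h2.1⟩
        have := (hmem w (by simp)).1 hm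
        omega
      obtain ⟨s2, heq, hchar⟩ := ih (PySem.Set.add s w) (out ++ [(w, (k : Int))]) hndt
        (fun w' hw' => by
          rw [PySem.Set.mem_add]
          constructor
          · rintro (hm | rfl)
            · exact (hmem w' (by simp [hw'])).1 hm
            · exact absurd hw' hwt
          · intro h; exact Or.inl ((hmem w' (by simp [hw'])).2 h))
      refine ⟨s2, ?_, ?_⟩
      · rw [List.foldl_cons, if_pos hcond, heq]
        simp [pvBlock, hfw, List.append_assoc]
      · intro x
        rw [hchar x, PySem.Set.mem_add]
        constructor
        · rintro ((hm | rfl) | ⟨hx, hfx⟩)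
          · exact Or.inl hm
          · exact Or.inr ⟨by simp, hfw⟩
          · exact Or.inr ⟨by simp [hx], hfx⟩
        · rintro (hm | ⟨hx, hfx⟩)
          · exact Or.inl (Or.inl hm)
          · rcases List.mem_cons.1 hx with rfl | hx'
            · exact Or.inl (Or.inr rfl)
            · exact Or.inr ⟨hx', hfx⟩
    · -- condition does not fire
      have hcond : (!(PySem.Set.contains s w)
          && pvStartswithFrom string w (k : Int)) = false := by
        cases hc : (!(PySem.Set.contains s w)
            && pvStartswithFrom string w (k : Int))
        · rfl
        · exfalso
          obtain ⟨h1, h2⟩ := (pv_bool_cond string w s k).1 hc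
          have hno : ¬(0 ≤ pvF string w ∧ pvF string w < (k : Int)) := by
            intro h; exact h1 ((hmem w (by simp)).2 h)
          exact hfw ((pv_cond_iff string w k).1 ⟨h2, hno⟩)
      obtain ⟨s2, heq, hchar⟩ := ih s out hndt (fun w' hw' => hmem w' (by simp [hw']))
      refine ⟨s2, ?_, ?_⟩
      · rw [List.foldl_cons, if_neg (by rw [hcond]; exact Bool.false_ne_true), heq]
        simp [pvBlock, hfw]
      · intro x
        rw [hchar x]
        constructor
        · rintro (hm | ⟨hx, hfx⟩)
          · exact Or.inl hm
          · exact Or.inr ⟨by simp [hx], hfx⟩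
        · rintro (hm | ⟨hx, hfx⟩)
          · exact Or.inl hm
          · rcases List.mem_cons.1 hx with rfl | hx'
            · exact absurd hfx hfw
            · exact Or.inr ⟨hx', hfx⟩

-- outer loop invariant
lemma pv_outer (string : String) (ws : List String) (hnd : ws.Nodup) :
    ∀ k : Nat,
      ∃ s, (List.map (fun j : Nat => (j : Int)) (List.range k)).foldl
          (fun st i =>
            ws.foldl (fun st w =>
              if !(PySem.Set.contains st.1 w)
                  && pvStartswithFrom string w i
              then (PySem.Set.add st.1 w, st.2 ++ [(w, i)])
              else st) st)
          ((PySem.Set.empty : PySem.Set String), ([] : List (String × Int)))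
        = (s, pvCanon string ws k)
        ∧ ∀ x, x ∈ s ↔ (x ∈ ws ∧ 0 ≤ pvF string x ∧ pvF string x < (k : Int)) := by
  intro k
  induction k with
  | zero =>
    refine ⟨PySem.Set.empty, by simp [pvCanon], fun x => ?_⟩
    simp [PySem.Set.empty]
  | succ k ih =>
    obtain ⟨s, heq, hchar⟩ := ih
    obtain ⟨s2, heq2, hchar2⟩ := pv_inner string k ws s (pvCanon string ws k) hnd
      (fun w hw => by rw [hchar w]; constructor
                      · rintro ⟨_, h⟩; exact h
                      · intro h; exact ⟨hw, h⟩)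
    refine ⟨s2, ?_, ?_⟩
    · rw [List.range_succ, List.map_append, List.foldl_append, heq]
      simp only [List.map_cons, List.map_nil, List.foldl_cons, List.foldl_nil]
      rw [heq2]
      simp [pvCanon, List.range_succ]
    · intro x
      rw [hchar2 x, hchar x]
      constructor
      · rintro (⟨hx, h0, h1⟩ | ⟨hx, hf⟩)
        · exact ⟨hx, h0, by push_cast; omega⟩
        · exact ⟨hx, by omega, by omega⟩
      · rintro ⟨hx, h0, h1⟩
        by_cases hf : pvF string x = (k : Int)
        · exact Or.inr ⟨hx, hf⟩
        · exact Or.inl ⟨hx, h0, by push_cast at h1 ⊢; omega⟩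

-- B's output is the canonical position-ordered list
lemma pvB_eq (string : String) (reverse : Bool) (hnd : (pvWords reverse).Nodup) :
    ordered_numbers_as_strings_alt string reverse
      = pvCanon string (pvWords reverse) string.toList.length := by
  show ((PySem.List.pyRange 0 (PySem.Str.len string)).foldl
    (fun st i =>
      (pvNUMBERS.keys.map (fun s => if reverse then flip_string s else s)).foldl
        (fun st w =>
          if !(PySem.Set.contains st.1 w)
              && pvStartswithFrom string w i
          then (PySem.Set.add st.1 w, st.2 ++ [(w, i)])
          else st) st)
    ((PySem.Set.empty : PySem.Set String), ([] : List (String × Int)))).2 = _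
  obtain ⟨s, heq, _⟩ := pv_outer string (pvWords reverse) hnd string.toList.length
  have hr : PySem.List.pyRange 0 (PySem.Str.len string)
      = List.map (fun j : Nat => (j : Int)) (List.range string.toList.length) := by
    rw [PySem.Str.len_eq, PySem.List.pyRange_one]
    simp
  simp only [pvWords] at heq
  rw [hr, heq]
  simp [pvWords]

-- permutation: pvCanon is a rearrangement of pvL
lemma pv_shuffle {α : Type} (y X Y : List α) : (y ++ (X ++ Y)).Perm (X ++ (y ++ Y)) := by
  rw [← List.append_assoc, ← List.append_assoc]
  exact List.perm_append_comm.append_right Y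

lemma pv_perm_flatMap_append {α ι : Type} (l : List ι) (a b : ι → List α) :
    (l.flatMap fun i => a i ++ b i).Perm (l.flatMap a ++ l.flatMap b) := by
  induction l with
  | nil => simp
  | cons i t ih =>
    simp only [List.flatMap_cons]
    refine (ih.append_left (a i ++ b i)).trans ?_
    rw [List.append_assoc, List.append_assoc]
    exact (pv_shuffle (b i) (t.flatMap a) (t.flatMap b)).append_left (a i)

lemma pv_flatMap_single {α : Type} (c : Int) (p : α) :
    ∀ n : Nat, ((List.range n).flatMap (fun i : Nat => if c = (i : Int) then [p] else []))
      = if 0 ≤ c ∧ c < (n : Int) then [p] else [] := by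
  intro n
  induction n with
  | zero => simp
  | succ n ih =>
    rw [List.range_succ, List.flatMap_append, ih]
    by_cases h : c = (n : Int)
    · rw [if_neg (by omega), if_pos (by omega)]
      simp [h]
    · by_cases h2 : 0 ≤ c ∧ c < (n : Int)
      · rw [if_pos h2, if_pos (by push_cast; omega)]
        simp [h]
      · rw [if_neg h2, if_neg (by push_cast at h2 ⊢; omega)]
        simp [h]

lemma pv_perm_canon (string : String) :
    ∀ ws : List String, (∀ w ∈ ws, w.toList ≠ []) →
      (pvCanon string ws string.toList.length).Perm (pvL string ws) := by
  intro ws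
  induction ws with
  | nil => simp [pvCanon, pvL, pvBlock]
  | cons w t ih =>
    intro hne
    have hblock : ∀ i : Int, pvBlock string (w :: t) i
        = (if pvF string w = i then [(w, i)] else []) ++ pvBlock string t i := by
      intro i
      rw [pvBlock, List.filterMap_cons]
      by_cases h : pvF string w = i <;> simp [h, pvBlock]
    have h1 : (pvCanon string (w :: t) string.toList.length).Perm
        (((List.range string.toList.length).flatMap
            (fun i : Nat => if pvF string w = (i : Int) then [(w, (i : Int))] else []))
          ++ pvCanon string t string.toList.length) := by
      unfold pvCanon
      have : ((List.range string.toList.length).flatMap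
          (fun i : Nat => pvBlock string (w :: t) (i : Int)))
          = ((List.range string.toList.length).flatMap
              (fun i : Nat => (if pvF string w = (i : Int) then [(w, (i : Int))] else [])
                ++ pvBlock string t (i : Int))) := by
        apply List.flatMap_congr  -- may need adjusting
        intro i _
        exact hblock (i : Int)
      rw [this]
      exact pv_perm_flatMap_append _ _ _
    have hsingle : ((List.range string.toList.length).flatMap
        (fun i : Nat => if pvF string w = (i : Int) then [(w, (i : Int))] else []))
        = if pvF string w ≠ -1 then [(w, pvF string w)] else [] := by
      have hcong : ((List.range string.toList.length).flatMap
          (fun i : Nat => if pvF string w = (i : Int) then [(w, (i : Int))] else []))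
          = ((List.range string.toList.length).flatMap
              (fun i : Nat => if pvF string w = (i : Int) then [(w, pvF string w)] else [])) := by
        apply List.flatMap_congr
        intro i _
        by_cases h : pvF string w = (i : Int) <;> simp [h]
      rw [hcong, pv_flatMap_single]
      have hiff := pv_f_ne_iff string w (hne w (by simp))
      by_cases h : pvF string w ≠ -1
      · rw [if_pos (hiff.1 h), if_pos h]
      · rw [if_neg (fun hc => h (hiff.2 hc)), if_neg h]
    have hL : pvL string (w :: t)
        = (if pvF string w ≠ -1 then [(w, pvF string w)] else []) ++ pvL string t := by
      rw [pvL, List.filterMap_cons]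
      by_cases h : pvF string w ≠ -1 <;> simp [h, pvL]
    rw [hL, ← hsingle]
    exact h1.trans ((ih (fun w' hw' => hne w' (by simp [hw']))).append_left _)

-- each position matches at most one word (no number word is a prefix of another)
lemma pv_block_len (string : String) (ws : List String) (hnd : ws.Nodup)
    (huniq : ∀ w1 ∈ ws, ∀ w2 ∈ ws, w1.toList <+: w2.toList → w1 = w2) (k : Nat) :
    (pvBlock string ws (k : Int)).length ≤ 1 := by
  have key : ∀ w1 ∈ ws, ∀ w2 ∈ ws, pvF string w1 = (k : Int) → pvF string w2 = (k : Int) →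
      w1 = w2 := by
    intro w1 h1 w2 h2 hf1 hf2
    have hs1 := PySem.Chars.find_spec (s := string.toList) (sub := w1.toList)
      (by simp only [pvF, PySem.Str.find_eq] at hf1; omega)
    have hs2 := PySem.Chars.find_spec (s := string.toList) (sub := w2.toList)
      (by simp only [pvF, PySem.Str.find_eq] at hf2; omega)
    simp only [pvF, PySem.Str.find_eq] at hf1 hf2
    rw [hf1] at hs1
    rw [hf2] at hs2
    simp only [Int.toNat_natCast] at hs1 hs2
    rcases List.prefix_or_prefix_of_prefix hs1.1 hs2.1 with h | h
    · exact huniq w1 h1 w2 h2 h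
    · exact (huniq w2 h2 w1 h1 h).symm
  clear huniq
  induction ws with
  | nil => simp [pvBlock]
  | cons w t ih =>
    rw [pvBlock, List.filterMap_cons]
    by_cases h : pvF string w = (k : Int)
    · rw [if_pos h]
      have ht : t.filterMap (fun w' => if pvF string w' = (k : Int) then some (w', (k : Int)) else none) = [] := by
        rw [List.filterMap_eq_nil_iff]
        intro w' hw'
        rw [if_neg]
        intro hf'
        have := key w (by simp) w' (by simp [hw']) h hf'
        exact (List.nodup_cons.1 hnd).1 (this ▸ hw')
      simp [ht]
    · rw [if_neg h]
      exact ih (List.nodup_cons.1 hnd).2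
        (fun w1 h1 w2 h2 hf1 hf2 => key w1 (by simp [h1]) w2 (by simp [h2]) hf1 hf2)

lemma pv_pairwise_canon (string : String) (ws : List String) (hnd : ws.Nodup)
    (huniq : ∀ w1 ∈ ws, ∀ w2 ∈ ws, w1.toList <+: w2.toList → w1 = w2) :
    (pvCanon string ws string.toList.length).Pairwise (fun a b => a.2 < b.2) := by
  have hsnd : ∀ i : Nat, ∀ x ∈ pvBlock string ws (i : Int), x.2 = (i : Int) := by
    intro i x hx
    obtain ⟨w, _, hw⟩ := List.mem_filterMap.1 hx
    by_cases h : pvF string w = (i : Int)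
    · rw [if_pos h] at hw; cases hw; rfl
    · rw [if_neg h] at hw; cases hw
  generalize string.toList.length = n
  induction n with
  | zero => simp [pvCanon]
  | succ n ih =>
    rw [pvCanon, List.range_succ, List.flatMap_append]
    rw [List.pairwise_append]
    refine ⟨ih, ?_, ?_⟩
    · have hlen := pv_block_len string ws hnd huniq n
      simp only [List.flatMap_cons, List.flatMap_nil, List.append_nil]
      rcases hb : pvBlock string ws (n : Int) with _ | ⟨x, _ | _⟩ <;> simp_all
    · intro a ha b hb
      obtain ⟨j, hj, haj⟩ := List.mem_flatMap.1 ha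
      simp only [List.flatMap_cons, List.flatMap_nil, List.append_nil] at hb
      have h1 : a.2 = (j : Int) := hsnd j a haj
      have h2 : b.2 = (n : Int) := hsnd n b hb
      rw [h1, h2]
      exact_mod_cast List.mem_range.1 hj

-- concrete word-list facts
lemma pv_words_nodup (reverse : Bool) : (pvWords reverse).Nodup := by
  cases reverse <;> decide

lemma pv_words_ne (reverse : Bool) : ∀ w ∈ pvWords reverse, w.toList ≠ [] := by
  cases reverse <;> decide

lemma pv_words_prefix (reverse : Bool) :
    ∀ w1 ∈ pvWords reverse, ∀ w2 ∈ pvWords reverse, w1.toList <+: w2.toList → w1 = w2 := by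
  cases reverse <;> decide

-- ===== VERDICT (by name: the statement is the Claim_ definition above) =====
theorem ordered_numbers_as_strings_spec : Claim_equal_ordered_numbers_as_strings := by
  intro string reverse _
  unfold Spec_ordered_numbers_as_strings
  rw [pvA_eq, pvB_eq string reverse (pv_words_nodup reverse)]
  exact PySem.List.sorted_eq_of_perm_of_pairwise_lt _ _ _
    (pv_perm_canon string (pvWords reverse) (pv_words_ne reverse))
    (pv_pairwise_canon string (pvWords reverse) (pv_words_nodup reverse)
      (pv_words_prefix reverse))
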